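-- pv_equiv track=rewrite | github.com/aditii010/smart_home_editone | added_evaluation.py | _generate_data_driven_explanation
-- ===== SOURCE A (Python) =====
-- from typing import Dict, List, Tuple, Optional
--
-- def _generate_data_driven_explanation(states_data: Dict, ground_truth: str) -> str:
--     """
--     Generate rule-based explanation from sensor data.
--     This represents a traditional data-driven explainer for comparison.
--     """
--     active_states = [state for state, windows in states_data.items() if windows]
--
--     if not active_states:
--         return "No significant sensor activity detected during this time window."
--
--     # Rule-based explanation logic
--     explanation_parts = []
--
--     # Check for location-specific patterns
--     kitchen_states = [s for s in active_states if "Kitchen" in s or "Microwave" in s]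
--     if kitchen_states:
--         explanation_parts.append("kitchen area activity detected")
--
--     living_room_states = [s for s in active_states if "Living" in s or "Tv" in s]
--     if living_room_states:
--         explanation_parts.append("living room engagement observed")
--
--     # Check for motion patterns
--     motion_states = [s for s in active_states if "Motion" in s or "Moving" in s]
--     if motion_states:
--         explanation_parts.append("movement patterns consistent with activity")
--
--     # Check for device interactions
--     device_states = [s for s in active_states if any(device in s for device in ["Light", "Door", "Microwave", "Tv"])]
--     if device_states:
--         explanation_parts.append(f"interaction with {len(device_states)} smart home devices")
--
--     base_explanation = "Data-driven analysis indicates " + ", ".join(explanation_parts) + "."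
--
--     # Add confidence qualifier based on number of supporting states
--     if len(active_states) >= 3:
--         return f"High confidence: {base_explanation}"
--     elif len(active_states) >= 2:
--         return f"Medium confidence: {base_explanation}"
--     else:
--         return f"Low confidence: {base_explanation}"
-- ===== SOURCE B (Python) =====
-- def _generate_data_driven_explanation(states_data, ground_truth):
--     """Single pass over the dict: flags + counters instead of four filtered lists."""
--     kitchen = living = motion = False
--     devices = 0
--     total = 0
--     for s, windows in states_data.items():
--         if not windows:
--             continue
--         total += 1
--         if "Kitchen" in s or "Microwave" in s:
--             kitchen = True
--         if "Living" in s or "Tv" in s: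
--             living = True
--         if "Motion" in s or "Moving" in s:
--             motion = True
--         if "Light" in s or "Door" in s or "Microwave" in s or "Tv" in s:
--             devices += 1
--     if total == 0:
--         return "No significant sensor activity detected during this time window."
--     parts = []
--     if kitchen:
--         parts.append("kitchen area activity detected")
--     if living:
--         parts.append("living room engagement observed")
--     if motion:
--         parts.append("movement patterns consistent with activity")
--     if devices:
--         parts.append(f"interaction with {devices} smart home devices")
--     base = "Data-driven analysis indicates " + ", ".join(parts) + "."
--     prefix = "High" if total >= 3 else "Medium" if total >= 2 else "Low"
--     return f"{prefix} confidence: {base}"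
-- ===== Notes on version B (the rewrite author's own statement) =====
-- stated objective: simpler
-- what changed: One pass over the dict maintaining three booleans and two counters replaces the intermediate active-states list plus four separate filtered lists; the report is then assembled from the flags/counters.
import Mathlib
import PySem

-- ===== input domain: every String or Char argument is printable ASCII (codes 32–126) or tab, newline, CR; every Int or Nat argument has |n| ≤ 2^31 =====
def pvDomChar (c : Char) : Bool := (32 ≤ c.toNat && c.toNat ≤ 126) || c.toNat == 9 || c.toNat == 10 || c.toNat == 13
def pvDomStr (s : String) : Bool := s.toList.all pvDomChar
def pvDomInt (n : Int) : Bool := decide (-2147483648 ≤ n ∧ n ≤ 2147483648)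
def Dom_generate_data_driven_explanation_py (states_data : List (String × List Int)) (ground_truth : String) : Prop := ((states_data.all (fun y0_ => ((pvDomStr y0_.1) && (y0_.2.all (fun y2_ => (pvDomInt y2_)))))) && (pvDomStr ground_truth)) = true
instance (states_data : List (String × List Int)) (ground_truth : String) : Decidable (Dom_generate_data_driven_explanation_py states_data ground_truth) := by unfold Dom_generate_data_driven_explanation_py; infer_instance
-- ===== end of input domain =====

-- B replaces A's intermediate active-states list and four filtered lists by one pass over
-- the dict maintaining three booleans and two counters (objective: simpler, same cost class).

-- ===== PORT A =====
def generate_data_driven_explanation_py (states_data : List (String × List Int)) (ground_truth : String) : String :=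
  let active_states := (states_data.filter (fun p => !p.2.isEmpty)).map Prod.fst
  if active_states.isEmpty then
    "No significant sensor activity detected during this time window."
  else
    let explanation_parts : List String := []
    let kitchen_states := active_states.filter (fun s => PySem.Str.isIn "Kitchen" s || PySem.Str.isIn "Microwave" s)
    let explanation_parts := if !kitchen_states.isEmpty then explanation_parts ++ ["kitchen area activity detected"] else explanation_parts
    let living_room_states := active_states.filter (fun s => PySem.Str.isIn "Living" s || PySem.Str.isIn "Tv" s)
    let explanation_parts := if !living_room_states.isEmpty then explanation_parts ++ ["living room engagement observed"] else explanation_parts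
    let motion_states := active_states.filter (fun s => PySem.Str.isIn "Motion" s || PySem.Str.isIn "Moving" s)
    let explanation_parts := if !motion_states.isEmpty then explanation_parts ++ ["movement patterns consistent with activity"] else explanation_parts
    let device_states := active_states.filter (fun s => (["Light", "Door", "Microwave", "Tv"] : List String).any (fun d => PySem.Str.isIn d s))
    let explanation_parts := if !device_states.isEmpty then explanation_parts ++ ["interaction with " ++ PySem.Int.toStr (device_states.length : Int) ++ " smart home devices"] else explanation_parts
    let base_explanation := "Data-driven analysis indicates " ++ PySem.Str.join ", " explanation_parts ++ "."
    if 3 ≤ (active_states.length : Int) then "High confidence: " ++ base_explanation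
    else if 2 ≤ (active_states.length : Int) then "Medium confidence: " ++ base_explanation
    else "Low confidence: " ++ base_explanation

-- ===== PORT B =====
-- loop body of Source B: state = (kitchen, living, motion, devices, total)
def pvAltStep (st : Bool × Bool × Bool × Int × Int) (p : String × List Int) : Bool × Bool × Bool × Int × Int :=
  if p.2.isEmpty then st
  else
    (st.1 || (PySem.Str.isIn "Kitchen" p.1 || PySem.Str.isIn "Microwave" p.1),
     st.2.1 || (PySem.Str.isIn "Living" p.1 || PySem.Str.isIn "Tv" p.1),
     st.2.2.1 || (PySem.Str.isIn "Motion" p.1 || PySem.Str.isIn "Moving" p.1),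
     st.2.2.2.1 + (if PySem.Str.isIn "Light" p.1 || PySem.Str.isIn "Door" p.1 || PySem.Str.isIn "Microwave" p.1 || PySem.Str.isIn "Tv" p.1 then 1 else 0),
     st.2.2.2.2 + 1)

def generate_data_driven_explanation_py_alt (states_data : List (String × List Int)) (ground_truth : String) : String :=
  let st := states_data.foldl pvAltStep (false, false, false, 0, 0)
  let kitchen := st.1
  let living := st.2.1
  let motion := st.2.2.1
  let devices := st.2.2.2.1
  let total := st.2.2.2.2
  if total = 0 then
    "No significant sensor activity detected during this time window."
  else
    let parts : List String := []
    let parts := if kitchen then parts ++ ["kitchen area activity detected"] else parts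
    let parts := if living then parts ++ ["living room engagement observed"] else parts
    let parts := if motion then parts ++ ["movement patterns consistent with activity"] else parts
    let parts := if devices ≠ 0 then parts ++ ["interaction with " ++ PySem.Int.toStr devices ++ " smart home devices"] else parts
    let base := "Data-driven analysis indicates " ++ PySem.Str.join ", " parts ++ "."
    let prfx := if 3 ≤ total then "High" else if 2 ≤ total then "Medium" else "Low"
    prfx ++ " confidence: " ++ base

-- ===== PRECONDITION & SPEC =====
def Spec_generate_data_driven_explanation_py (states_data : List (String × List Int)) (ground_truth : String) (out : String) : Prop := out = generate_data_driven_explanation_py_alt states_data ground_truth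
instance (states_data : List (String × List Int)) (ground_truth : String) (out : String) : Decidable (Spec_generate_data_driven_explanation_py states_data ground_truth out) := by unfold Spec_generate_data_driven_explanation_py; infer_instance

-- ===== CLAIM (what is proved, stated in full; the proofs are below) =====
def Claim_equal_generate_data_driven_explanation_py : Prop := ∀ (states_data : List (String × List Int)) (ground_truth : String), Dom_generate_data_driven_explanation_py states_data ground_truth → Spec_generate_data_driven_explanation_py states_data ground_truth (generate_data_driven_explanation_py states_data ground_truth)

-- ===== LEMMAS AND PROOFS =====

-- predicates of the fold, named for the invariant
def pvPK (s : String) : Bool := PySem.Str.isIn "Kitchen" s || PySem.Str.isIn "Microwave" s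
def pvPL (s : String) : Bool := PySem.Str.isIn "Living" s || PySem.Str.isIn "Tv" s
def pvPM (s : String) : Bool := PySem.Str.isIn "Motion" s || PySem.Str.isIn "Moving" s
def pvPD (s : String) : Bool := PySem.Str.isIn "Light" s || PySem.Str.isIn "Door" s || PySem.Str.isIn "Microwave" s || PySem.Str.isIn "Tv" s

lemma pvFold_spec (sd : List (String × List Int)) (k l m : Bool) (d t : Int) :
    sd.foldl pvAltStep (k, l, m, d, t) =
      (let A := (sd.filter (fun p => !p.2.isEmpty)).map Prod.fst
       (k || A.any pvPK, l || A.any pvPL, m || A.any pvPM,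
        d + (A.countP pvPD : Int), t + (A.length : Int))) := by
  induction sd generalizing k l m d t with
  | nil => simp
  | cons hd tl ih =>
    by_cases h : hd.2.isEmpty
    · simp [pvAltStep, h, ih]
    · simp only [List.foldl_cons, pvAltStep, h, ih, List.filter_cons]
      simp [pvPK, pvPL, pvPM, pvPD, Bool.or_assoc, List.countP_cons]
      constructor
      · by_cases hc : pvPD hd.1 = true <;>
          simp_all [pvPD, Bool.or_assoc] <;> push_cast <;> ring
      · push_cast; ring

lemma pvFilter_isEmpty (l : List String) (p : String → Bool) :
    (l.filter p).isEmpty = !l.any p := by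
  induction l with
  | nil => simp
  | cons h t ih => by_cases hp : p h <;> simp [hp, ih]

lemma pvAnyDev (s : String) :
    ((["Light", "Door", "Microwave", "Tv"] : List String).any (fun d => PySem.Str.isIn d s)) = pvPD s := by
  simp [pvPD, List.any_cons, List.any_nil, Bool.or_assoc]

-- ===== VERDICT (by name: the statement is the Claim_ definition above) =====
theorem generate_data_driven_explanation_py_spec : Claim_equal_generate_data_driven_explanation_py := by
  intro sd gt _
  unfold Spec_generate_data_driven_explanation_py
  unfold generate_data_driven_explanation_py generate_data_driven_explanation_py_alt
  simp only [pvFold_spec, Bool.false_or, Int.zero_add]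
  set A := (sd.filter (fun p => !p.2.isEmpty)).map Prod.fst with hA
  have ek : (fun s => PySem.Str.isIn "Kitchen" s || PySem.Str.isIn "Microwave" s) = pvPK := rfl
  have el : (fun s => PySem.Str.isIn "Living" s || PySem.Str.isIn "Tv" s) = pvPL := rfl
  have em : (fun s => PySem.Str.isIn "Motion" s || PySem.Str.isIn "Moving" s) = pvPM := rfl
  by_cases hE : A.isEmpty
  · have h0 : A.length = 0 := by simpa [List.isEmpty_iff] using hE
    simp [hE, h0]
  · have hne : A ≠ [] := by simpa [List.isEmpty_iff] using hE
    have hpos : 0 < A.length := List.length_pos_of_ne_nil hne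
    have hlen : ¬ ((A.length : Int) = 0) := by omega
    have hcnt : (A.filter pvPD).length = A.countP pvPD := List.countP_eq_length_filter.symm
    by_cases hany : A.any pvPD = true
    · have hcpos : 0 < A.countP pvPD := by
        rcases List.any_eq_true.mp hany with ⟨a, ha, hpa⟩
        rcases Nat.eq_zero_or_pos (A.countP pvPD) with h0 | h0
        · exact absurd hpa (by simpa using (List.countP_eq_zero.mp h0) a ha)
        · exact h0
      have hdev : ¬ ((A.countP pvPD : Int) = 0) := by omega
      simp only [hE, Bool.false_eq_true, if_false, hlen, if_neg, not_false_iff,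
        pvFilter_isEmpty, pvAnyDev, ek, el, em, Bool.not_not, hany, hcnt, hdev,
        if_true, ite_not]
      by_cases h3 : 3 ≤ (A.length : Int)
      · simp [h3]
      · by_cases h2 : 2 ≤ (A.length : Int) <;> simp [h3, h2]
    · have h0 : A.countP pvPD = 0 :=
        List.countP_eq_zero.mpr (by simpa [List.any_eq_false] using hany)
      have hdev : ((A.countP pvPD : Int) = 0) := by omega
      simp only [hE, Bool.false_eq_true, if_false, hlen, if_neg, not_false_iff,
        pvFilter_isEmpty, pvAnyDev, ek, el, em, Bool.not_not, hany, hcnt, hdev,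
        if_true, ite_not]
      by_cases h3 : 3 ≤ (A.length : Int)
      · simp [h3]
      · by_cases h2 : 2 ≤ (A.length : Int) <;> simp [h3, h2]
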